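-- pv_equiv track=rewrite | github.com/floraldo/hive | scripts/fix_all_syntax_errors.py | fix_missing_commas_in_lists
-- ===== SOURCE A (Python) =====
-- def fix_missing_commas_in_lists(content: str) -> str:
--     """Fix missing commas in lists and tuples."""
--     # Fix patterns like:
--     # (item1, source1)
--     # (item2, source2)  <- missing comma
--     # (item3, source3)
--
--     lines = content.split("\n")
--     new_lines = []
--
--     for i, line in enumerate(lines):
--         # Check if line ends with ) and next line starts with whitespace and (
--         if line.strip().endswith(")") and not line.strip().endswith(",)"):
--             if i + 1 < len(lines):
--                 next_line = lines[i + 1]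
--                 # Check if next line is at same or similar indentation and starts with (
--                 if next_line.strip().startswith("("):
--                     # Add comma to current line
--                     new_lines.append(line.rstrip() + ",")
--                     continue
--         new_lines.append(line)
--
--     return "\n".join(new_lines)
-- ===== SOURCE B (Python) =====
-- def fix_missing_commas_in_lists(content: str) -> str:
--     """Fix missing commas in lists and tuples.
--
--     Single reverse pass carrying one boolean ('does the following line start
--     with "("?') instead of indexed lookahead into the line list.
--     """
--     out = []
--     next_starts_paren = False
--     for line in reversed(content.split("\n")):
--         stripped = line.strip()
--         if next_starts_paren and stripped.endswith(")") and not stripped.endswith(",)"):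
--             out.append(line.rstrip() + ",")
--         else:
--             out.append(line)
--         next_starts_paren = stripped.startswith("(")
--     return "\n".join(reversed(out))
-- ===== Notes on version B (the rewrite author's own statement) =====
-- stated objective: alternative
-- what changed: Replaces A's forward enumerate loop with indexed lookahead into lines[i+1] by a single reverse pass that carries one boolean state recording whether the following line opens a tuple, removing all index arithmetic.
import Mathlib
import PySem

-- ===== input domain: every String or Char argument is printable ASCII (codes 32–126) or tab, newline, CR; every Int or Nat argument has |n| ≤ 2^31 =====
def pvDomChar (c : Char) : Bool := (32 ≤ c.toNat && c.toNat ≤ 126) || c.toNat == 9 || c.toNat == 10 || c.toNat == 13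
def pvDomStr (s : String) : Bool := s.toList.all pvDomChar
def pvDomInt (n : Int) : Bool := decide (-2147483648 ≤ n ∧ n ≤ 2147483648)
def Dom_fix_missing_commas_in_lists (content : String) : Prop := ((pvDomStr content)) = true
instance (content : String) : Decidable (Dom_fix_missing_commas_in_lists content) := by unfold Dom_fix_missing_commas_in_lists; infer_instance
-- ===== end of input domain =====

-- B replaces A's indexed lookahead (lines[i+1]) by a single reverse pass that carries one
-- boolean state recording whether the following line opens a tuple; objective: alternative decomposition.

-- ===== PORT A =====
-- A's "for i, line in enumerate(lines)" loop: i is the enumerate counter, new_lines the accumulator.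
def fixLoopA (lines : List String) : Nat → List String → List String → List String
  | _, [], acc => acc
  | i, line :: rest, acc =>
    if PySem.Str.endswith (PySem.Str.strip line) ")"
        && !(PySem.Str.endswith (PySem.Str.strip line) ",)") then
      if i + 1 < lines.length then
        let next_line := (PySem.List.pyGet? lines ((i : Int) + 1)).getD ""
        if PySem.Str.startswith (PySem.Str.strip next_line) "(" then
          fixLoopA lines (i + 1) rest (acc ++ [PySem.Str.rstrip line ++ ","])
        else
          fixLoopA lines (i + 1) rest (acc ++ [line])
      else
        fixLoopA lines (i + 1) rest (acc ++ [line])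
    else
      fixLoopA lines (i + 1) rest (acc ++ [line])

def fix_missing_commas_in_lists (content : String) : String :=
  let lines := (PySem.Str.split? content "\n").getD []
  let new_lines := fixLoopA lines 0 lines []
  PySem.Str.join "\n" new_lines

-- ===== PORT B =====
-- B's reverse loop: state = (next_starts_paren, out); called on the reversed line list.
def fixLoopB : (Bool × List String) → List String → (Bool × List String)
  | st, [] => st
  | (nextStarts, out), line :: rest =>
    let stripped := PySem.Str.strip line
    let out' :=
      if nextStarts && PySem.Str.endswith stripped ")"
          && !(PySem.Str.endswith stripped ",)") then
        out ++ [PySem.Str.rstrip line ++ ","]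
      else
        out ++ [line]
    fixLoopB (PySem.Str.startswith stripped "(", out') rest

def fix_missing_commas_in_lists_alt (content : String) : String :=
  let st := fixLoopB (false, []) ((PySem.Str.split? content "\n").getD []).reverse
  PySem.Str.join "\n" st.2.reverse

-- ===== PRECONDITION & SPEC =====
def Spec_fix_missing_commas_in_lists (content : String) (out : String) : Prop := out = fix_missing_commas_in_lists_alt content
instance (content : String) (out : String) : Decidable (Spec_fix_missing_commas_in_lists content out) := by unfold Spec_fix_missing_commas_in_lists; infer_instance

-- ===== CLAIM (what is proved, stated in full; the proofs are below) =====
def Claim_equal_fix_missing_commas_in_lists : Prop := ∀ (content : String), Dom_fix_missing_commas_in_lists content → Spec_fix_missing_commas_in_lists content (fix_missing_commas_in_lists content)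

-- ===== LEMMAS AND PROOFS =====

-- the per-line tests both programs perform
def pvEnds (line : String) : Bool :=
  PySem.Str.endswith (PySem.Str.strip line) ")" && !(PySem.Str.endswith (PySem.Str.strip line) ",)")

def pvStarts (line : String) : Bool :=
  PySem.Str.startswith (PySem.Str.strip line) "("

def pvHead : List String → Bool
  | [] => false
  | y :: _ => pvStarts y

-- the common pairwise specification: each line transformed according to its successor
def pvProc : List String → List String
  | [] => []
  | x :: rest =>
    (if pvHead rest && pvEnds x then PySem.Str.rstrip x ++ "," else x) :: pvProc rest

def pvStep (st : Bool × List String) (x : String) : Bool × List String :=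
  (pvStarts x, st.2 ++ [if st.1 && pvEnds x then PySem.Str.rstrip x ++ "," else x])

theorem fixLoopA_eq (lines : List String) :
    ∀ (ys : List String) (k : Nat) (acc : List String),
      lines.drop k = ys → fixLoopA lines k ys acc = acc ++ pvProc ys := by
  intro ys
  induction ys with
  | nil => intro k acc _; simp [fixLoopA, pvProc]
  | cons x rest ih =>
    intro k acc h
    have hdrop : lines.drop (k + 1) = rest := by
      rw [← List.drop_drop, h]
      rfl
    have hlen : lines.length - k = rest.length + 1 := by
      have := congrArg List.length h
      simpa [List.length_drop] using this
    have hk : k < lines.length := by omega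
    cases rest with
    | nil =>
      have hge : ¬ (k + 1 < lines.length) := by
        simp at hlen; omega
      simp only [fixLoopA, hge]
      simp [pvProc, pvHead]
    | cons y rest' =>
      have hlt : k + 1 < lines.length := by simp at hlen; omega
      have hget : PySem.List.pyGet? lines ((k : Int) + 1) = some y := by
        have h0 : ((k : Int) + 1) = ((k + 1 : Nat) : Int) := by push_cast; ring
        have h1 : (lines.drop (k + 1))[0]? = some y := by rw [hdrop]; rfl
        rw [h0, PySem.List.pyGet?_natCast]
        simpa [List.getElem?_drop] using h1
      have ihx := fun acc => ih (k + 1) acc hdrop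
      rw [fixLoopA]
      simp only [hlt, if_true, hget, Option.getD_some, ihx]
      simp only [pvProc, pvHead, pvEnds, pvStarts]
      split_ifs <;> simp_all

theorem fixLoopB_append (x : String) :
    ∀ (zs : List String) (st : Bool × List String),
      fixLoopB st (zs ++ [x]) = pvStep (fixLoopB st zs) x := by
  intro zs
  induction zs with
  | nil =>
    intro st
    cases st with
    | mk b out =>
      simp only [List.nil_append, fixLoopB, pvStep, pvEnds, pvStarts, Bool.and_assoc]
      split <;> simp_all
  | cons z zs ih =>
    intro st
    cases st with
    | mk b out => simp only [List.cons_append, fixLoopB]; exact ih _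

theorem fixLoopB_eq :
    ∀ (ys : List String),
      fixLoopB (false, []) ys.reverse = (pvHead ys, (pvProc ys).reverse) := by
  intro ys
  induction ys with
  | nil => simp [fixLoopB, pvHead, pvProc]
  | cons x rest ih =>
    rw [List.reverse_cons, fixLoopB_append, ih]
    simp [pvStep, pvHead, pvProc]

-- ===== VERDICT (by name: the statement is the Claim_ definition above) =====
theorem fix_missing_commas_in_lists_spec : Claim_equal_fix_missing_commas_in_lists := by
  intro content _
  unfold Spec_fix_missing_commas_in_lists
  simp only [fix_missing_commas_in_lists, fix_missing_commas_in_lists_alt]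
  rw [fixLoopA_eq _ _ 0 [] List.drop_zero, fixLoopB_eq]
  simp
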